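-- pv_equiv track=rewrite | github.com/nielmclaren/AdventOfCode | 2025/day10/traversal.py | __get_button_permu_groups
-- ===== SOURCE A (Python) =====
-- import itertools
--
-- def __get_button_permu_groups(buttons):
--     groups = []
--     largest_button = max(map(len, buttons))
--     for i in range(largest_button, -1, -1):
--         group = [j for j, button in enumerate(buttons) if len(button) == i + 1]
--         if len(group) > 0:
--             groups.append(group)
--
--     permu_groups = []
--     for group in groups:
--         if len(group) > 1:
--             permu_groups.append(list(itertools.permutations(group)))
--         else:
--             permu_groups.append([group])
--
--     return permu_groups
-- ===== SOURCE B (Python) =====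
-- import itertools
--
-- def __get_button_permu_groups(buttons):
--     buckets = {}
--     for j, button in enumerate(buttons):
--         buckets.setdefault(len(button), []).append(j)
--     largest = max(map(len, buttons))
--     groups = [buckets[L] for L in range(largest, 0, -1) if L in buckets]
--     return [list(itertools.permutations(g)) if len(g) > 1 else [g] for g in groups]
-- ===== Notes on version B (the rewrite author's own statement) =====
-- stated objective: alternative
-- what changed: B buckets indices by button length in one dict-building pass and reads the groups off the buckets in descending length order, instead of A re-scanning the whole button list once for every length from the maximum down to 0.
import Mathlib
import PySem

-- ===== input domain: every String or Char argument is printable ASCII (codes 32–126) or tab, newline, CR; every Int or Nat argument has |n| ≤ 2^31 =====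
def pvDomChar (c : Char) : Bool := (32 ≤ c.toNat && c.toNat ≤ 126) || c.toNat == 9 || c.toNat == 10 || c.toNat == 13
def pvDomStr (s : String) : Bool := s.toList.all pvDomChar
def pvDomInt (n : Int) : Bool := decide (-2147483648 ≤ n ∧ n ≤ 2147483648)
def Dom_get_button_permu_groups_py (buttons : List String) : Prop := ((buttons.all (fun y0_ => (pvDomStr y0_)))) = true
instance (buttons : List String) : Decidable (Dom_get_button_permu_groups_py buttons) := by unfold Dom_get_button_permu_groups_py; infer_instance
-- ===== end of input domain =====

-- B replaces A's per-length rescans of the whole button list with a single bucketing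
-- pass into a dict keyed by length (objective: alternative decomposition of the grouping).

-- ===== PORT A =====
def get_button_permu_groups_py (buttons : List String) : List (List (List Int)) :=
  match PySem.List.max? (buttons.map (fun b => PySem.Str.len b)) (fun x => x) with
  | none => []   -- Python raises ValueError on max() of an empty sequence; excluded by Pre_
  | some largest_button =>
    let groups : List (List Int) :=
      (PySem.List.pyRange largest_button (-1) (-1)).foldl (fun groups i =>
        let group := ((PySem.List.enumerate buttons 0).filter
            (fun p => PySem.Str.len p.2 == i + 1)).map (fun p => p.1)
        if group.length > 0 then groups ++ [group] else groups) []
    groups.foldl (fun permu_groups group =>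
      if group.length > 1 then permu_groups ++ [PySem.List.permutations group group.length]
      else permu_groups ++ [[group]]) []

-- ===== PORT B =====
def get_button_permu_groups_py_alt (buttons : List String) : List (List (List Int)) :=
  let buckets : PySem.Dict Int (List Int) :=
    (PySem.List.enumerate buttons 0).foldl
      (fun d p => d.modify (PySem.Str.len p.2) [] (fun v => v ++ [p.1])) PySem.Dict.empty
  match PySem.List.max? (buttons.map (fun b => PySem.Str.len b)) (fun x => x) with
  | none => []   -- max() raises here in Python as well; excluded by Pre_
  | some largest =>
    let groups : List (List Int) :=
      ((PySem.List.pyRange largest 0 (-1)).filter (fun L => buckets.contains L)).map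
        (fun L => buckets.getD L [])
    groups.map (fun g =>
      if g.length > 1 then PySem.List.permutations g g.length else [g])

-- ===== PRECONDITION & SPEC =====
-- Python A raises ValueError (max of empty sequence) on the empty list; B raises there too.
def Pre_get_button_permu_groups_py (buttons : List String) : Prop := buttons ≠ []
instance (buttons : List String) : Decidable (Pre_get_button_permu_groups_py buttons) := by unfold Pre_get_button_permu_groups_py; infer_instance
def pvWitness_get_button_permu_groups_py : List String := ["ab", "c", ""]

def Spec_get_button_permu_groups_py (buttons : List String) (out : List (List (List Int))) : Prop := out = get_button_permu_groups_py_alt buttons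
instance (buttons : List String) (out : List (List (List Int))) : Decidable (Spec_get_button_permu_groups_py buttons out) := by unfold Spec_get_button_permu_groups_py; infer_instance

-- ===== CLAIM (what is proved, stated in full; the proofs are below) =====
def Claim_equal_get_button_permu_groups_py : Prop := ∀ (buttons : List String), Dom_get_button_permu_groups_py buttons → Pre_get_button_permu_groups_py buttons → Spec_get_button_permu_groups_py buttons (get_button_permu_groups_py buttons)

-- ===== LEMMAS AND PROOFS =====

-- the index group for a given button length
def pvGrp (buttons : List String) (L : Int) : List Int :=
  ((PySem.List.enumerate buttons 0).filter
      (fun p => PySem.Str.len p.2 == L)).map (fun p => p.1)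

-- port B's buckets dict, looked up, holds exactly the filtered index group
theorem pvBuckets_getD (buttons : List String) (L : Int) :
    (((PySem.List.enumerate buttons 0).foldl
      (fun d p => d.modify (PySem.Str.len p.2) [] (fun v => v ++ [p.1]))
      (PySem.Dict.empty : PySem.Dict Int (List Int))).getD L [])
    = pvGrp buttons L := by
  have h : (PySem.List.enumerate buttons 0).foldl
      (fun d p => d.modify (PySem.Str.len p.2) [] (fun v => v ++ [p.1]))
      (PySem.Dict.empty : PySem.Dict Int (List Int))
      = ((PySem.List.enumerate buttons 0).map (fun p => (PySem.Str.len p.2, p.1))).foldl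
      (fun d q => d.modify q.1 [] (fun v => v ++ [q.2])) PySem.Dict.empty := by
    rw [List.foldl_map]
  rw [h, PySem.Dict.getD_foldl_modify_append]
  simp [pvGrp, List.filter_map, Function.comp_def]

-- a length is a key of the buckets dict iff its index group is nonempty
theorem pvBuckets_contains (buttons : List String) (L : Int) :
    (((PySem.List.enumerate buttons 0).foldl
      (fun d p => d.modify (PySem.Str.len p.2) [] (fun v => v ++ [p.1]))
      (PySem.Dict.empty : PySem.Dict Int (List Int))).contains L)
    = ((pvGrp buttons L).length > 0 : Bool) := by
  rw [Bool.eq_iff_iff, decide_eq_true_iff, PySem.Dict.contains_iff_mem_keys,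
    PySem.Dict.keys_foldl_modify_key (PySem.List.enumerate buttons 0)
      (fun p => PySem.Str.len p.2) [] (fun _ p => fun v => v ++ [p.1]) PySem.Dict.empty]
  simp [pvGrp, PySem.Set.mem_update, List.length_pos_iff, List.filter_eq_nil_iff]

-- no button is longer than the maximum length
theorem pvGrp_top_empty (buttons : List String) (largest : Int)
    (h : PySem.List.max? (buttons.map (fun b => PySem.Str.len b)) (fun x => x) = some largest) :
    pvGrp buttons (largest + 1) = [] := by
  have hmax := PySem.List.max?_isMax h
  simp only [pvGrp, List.map_eq_nil_iff, List.filter_eq_nil_iff]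
  intro p hp
  have h2 : PySem.Str.len p.2 <= largest := by
    apply hmax
    rw [PySem.List.mem_enumerate_iff] at hp
    obtain ⟨k, hk, rfl⟩ := hp
    exact List.mem_map_of_mem (List.getElem_mem hk)
  simp [PySem.Str.len_eq] at h2 ⊢; omega

-- A's countdown range, after dropping the top length, is B's range shifted by one
theorem pvRange_shift (largest : Int) :
    PySem.List.pyRange (largest - 1) (-1) (-1)
      = (PySem.List.pyRange largest 0 (-1)).map (fun L => L - 1) := by
  simp only [PySem.List.pyRange_neg_one, List.map_map]
  have h : (largest - 1 - -1).toNat = (largest - 0).toNat := by omega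
  rw [h]
  apply List.map_congr_left
  intro k _
  simp [Function.comp]; omega

theorem pvMax_nonneg (buttons : List String) (largest : Int)
    (h : PySem.List.max? (buttons.map (fun b => PySem.Str.len b)) (fun x => x) = some largest) :
    0 <= largest := by
  have hm := PySem.List.max?_mem h
  obtain ⟨b, _, rfl⟩ := List.mem_map.mp hm
  simp [PySem.Str.len_eq]

-- ===== VERDICT (by name: the statement is the Claim_ definition above) =====
theorem get_button_permu_groups_py_spec : Claim_equal_get_button_permu_groups_py := by
  intro buttons _ _
  unfold Spec_get_button_permu_groups_py get_button_permu_groups_py get_button_permu_groups_py_alt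
  cases h : PySem.List.max? (buttons.map (fun b => PySem.Str.len b)) (fun x => x) with
  | none => simp
  | some largest =>
    simp only
    -- rewrite A's second loop into a map
    have hfun : (fun (pg : List (List (List Int))) (g : List Int) =>
        if g.length > 1 then pg ++ [PySem.List.permutations g g.length] else pg ++ [[g]])
        = fun pg g => pg ++ [if g.length > 1 then PySem.List.permutations g g.length else [g]] := by
      funext pg g; split <;> rfl
    rw [hfun, PySem.List.foldl_append_singleton_eq_map]
    simp only [List.nil_append]
    congr 1
    -- A's group loop as filter+map
    simp only [← pvGrp.eq_def]
    rw [PySem.List.foldl_append_ite (p := fun i => (pvGrp buttons (i + 1)).length > 0)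
        (f := fun i => pvGrp buttons (i + 1))]
    simp only [List.nil_append]
    -- B's filter and lookup in terms of pvGrp
    have hc : (fun L => (((PySem.List.enumerate buttons 0).foldl
        (fun d p => d.modify (PySem.Str.len p.2) [] (fun v => v ++ [p.1]))
        (PySem.Dict.empty : PySem.Dict Int (List Int))).contains L))
        = fun L => ((pvGrp buttons L).length > 0 : Bool) := by
      funext L; exact pvBuckets_contains buttons L
    have hg : (fun L => (((PySem.List.enumerate buttons 0).foldl
        (fun d p => d.modify (PySem.Str.len p.2) [] (fun v => v ++ [p.1]))
        (PySem.Dict.empty : PySem.Dict Int (List Int))).getD L []))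
        = fun L => pvGrp buttons L := by
      funext L; exact pvBuckets_getD buttons L
    rw [hc, hg]
    -- peel the top element of A's countdown and shift
    have h0 : (0 : Int) <= largest := pvMax_nonneg buttons largest h
    rw [PySem.List.pyRange_neg_one_cons (by omega : (-1 : Int) < largest)]
    rw [List.filter_cons]
    have htop : (decide ((pvGrp buttons (largest + 1)).length > 0)) = false := by
      simp [pvGrp_top_empty buttons largest h]
    rw [htop]
    simp only [Bool.false_eq_true, if_false]
    rw [pvRange_shift, List.filter_map, List.map_map]
    simp [Function.comp_def]
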